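-- pv_equiv track=rewrite | github.com/ChinomnsoC/data-structure-algorithms | climate_analytics/maximise_adjacent_increases.py | maximise_adj_increases
-- ===== SOURCE A (Python) =====
-- def maximise_adj_increases(arr):
--     if not arr:
--         return 0
--     array_map = {}
--     n = len(arr)
--
--
--     for val in arr:
--         array_map[val] = array_map.get(val, 0) + 1
--
--     # distinct_val_in_arr = len(array_map)
--
--     max_freq = max(array_map.values())
--
--     return n - max_freq
-- ===== SOURCE B (Python) =====
-- def _max_freq(arr):
--     # max multiplicity by peeling distinct values: filter out all copies of the
--     # current first value, its multiplicity is the length drop; loop on the rest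
--     best = 0
--     while arr:
--         rest = [y for y in arr if y != arr[0]]
--         best = max(best, len(arr) - len(rest))
--         arr = rest
--     return best
--
--
-- def maximise_adj_increases(arr):
--     if not arr:
--         return 0
--     return len(arr) - _max_freq(arr)
-- ===== Notes on version B (the rewrite author's own statement) =====
-- stated objective: alternative
-- what changed: Replaces A's frequency-dict pass plus max over its values with a loop that peels whole distinct values: filter out all copies of the current first element, its multiplicity is the length drop, accumulate the running maximum on the remainder; no dictionary is built.
import Mathlib
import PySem

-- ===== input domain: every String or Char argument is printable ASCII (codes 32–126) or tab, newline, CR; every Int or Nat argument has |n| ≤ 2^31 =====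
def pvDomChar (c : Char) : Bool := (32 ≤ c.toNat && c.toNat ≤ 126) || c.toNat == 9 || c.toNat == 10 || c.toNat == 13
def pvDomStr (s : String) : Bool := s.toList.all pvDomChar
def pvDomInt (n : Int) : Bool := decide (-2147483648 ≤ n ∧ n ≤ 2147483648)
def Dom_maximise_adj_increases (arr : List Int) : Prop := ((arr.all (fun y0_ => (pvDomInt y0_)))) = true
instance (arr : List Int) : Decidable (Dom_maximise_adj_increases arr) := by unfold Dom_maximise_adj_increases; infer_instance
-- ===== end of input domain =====

-- B replaces A's frequency-dict pass with a loop peeling distinct values (filter out the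
-- first value, count it via the length drop, continue on the rest) — alternative, no dict.

-- ===== PORT A =====
def maximise_adj_increases (arr : List Int) : Int :=
  if arr = [] then 0
  else
    -- for val in arr: array_map[val] = array_map.get(val, 0) + 1
    let array_map : PySem.Dict Int Int :=
      arr.foldl (fun d val => d.insert val (d.getD val 0 + 1)) PySem.Dict.empty
    let n : Int := arr.length
    -- max_freq = max(array_map.values())  (nonempty here since arr ≠ [])
    match PySem.List.max? array_map.values (fun v => v) with
    | some max_freq => n - max_freq
    | none => 0  -- unreachable (Python max on empty would raise; dict is nonempty)

-- ===== PORT B =====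
-- _max_freq's while loop: rest = [y for y in arr if y != arr[0]];
-- best = max(best, len(arr) - len(rest)); arr = rest
def pvMaxFreqLoop (best : Int) : List Int → Int
  | [] => best
  | x :: t =>
    let rest := (x :: t).filter (fun y => y ≠ x)
    pvMaxFreqLoop (max best ((x :: t).length - rest.length : Int)) rest
  termination_by arr => arr.length
  decreasing_by
    have hle : ((x :: t).filter (fun y => decide (y ≠ x))).length ≤ t.length := by
      simp; exact List.length_filter_le _ t
    simpa using Nat.lt_succ_of_le hle

def maximise_adj_increases_alt (arr : List Int) : Int :=
  if arr = [] then 0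
  else (arr.length : Int) - pvMaxFreqLoop 0 arr

-- ===== PRECONDITION & SPEC =====
def Spec_maximise_adj_increases (arr : List Int) (out : Int) : Prop := out = maximise_adj_increases_alt arr
instance (arr : List Int) (out : Int) : Decidable (Spec_maximise_adj_increases arr out) := by unfold Spec_maximise_adj_increases; infer_instance

-- ===== CLAIM (what is proved, stated in full; the proofs are below) =====
def Claim_equal_maximise_adj_increases : Prop := ∀ (arr : List Int), Dom_maximise_adj_increases arr → Spec_maximise_adj_increases arr (maximise_adj_increases arr)

-- ===== LEMMAS AND PROOFS =====

-- proof-side recursion: the value the while loop accumulates, without its accumulator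
def pvMaxFreqB : List Int → Int
  | [] => 0
  | x :: t =>
    let rest := (x :: t).filter (fun y => y ≠ x)
    max ((x :: t).length - rest.length : Int) (pvMaxFreqB rest)
  termination_by arr => arr.length
  decreasing_by
    have hle : ((x :: t).filter (fun y => decide (y ≠ x))).length ≤ t.length := by
      simp; exact List.length_filter_le _ t
    simpa using Nat.lt_succ_of_le hle

-- the loop's accumulator merges by max into the recursive value
theorem loop_eq_maxFreqB (best : Int) (arr : List Int) (hb : 0 ≤ best) :
    pvMaxFreqLoop best arr = max best (pvMaxFreqB arr) := by
  induction arr using pvMaxFreqB.induct generalizing best with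
  | case1 =>
    rw [pvMaxFreqLoop, pvMaxFreqB]
    exact (max_eq_left hb).symm
  | case2 x t rest ih =>
    have hc : (0:Int) ≤ ((x :: t).length : Int) - (rest.length : Int) := by
      have hr : rest.length ≤ (x :: t).length := by
        simpa [rest] using List.length_filter_le (fun y => decide (y ≠ x)) (x :: t)
      omega
    rw [pvMaxFreqLoop, pvMaxFreqB]
    rw [ih _ (le_max_of_le_right hc)]
    rw [max_assoc]

-- accumulating a value already present: filtering it from the rest of the input changes nothing
theorem add_foldl_mem (x : Int) (t : List Int) (s : List Int) (hx : s.contains x = true) :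
    t.foldl PySem.Set.add s = (t.filter (fun y => y ≠ x)).foldl PySem.Set.add s := by
  induction t generalizing s with
  | nil => rfl
  | cons a t ih =>
    by_cases h : a = x
    · subst h
      simp only [List.filter_cons, ne_eq, not_true_eq_false, decide_false, Bool.false_eq_true,
        if_false, List.foldl_cons, PySem.Set.add, PySem.Set.contains, hx, if_true]
      exact ih s hx
    · simp only [List.filter_cons, ne_eq, h, not_false_eq_true, decide_true, if_true,
        List.foldl_cons]
      apply ih
      unfold PySem.Set.add
      split
      · exact hx
      · simp_all [PySem.Set.contains]

-- a head no later element repeats stays at the head of the accumulated set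
theorem foldl_add_cons (x : Int) (l : List Int) (s : List Int)
    (hl : ∀ y ∈ l, y ≠ x) :
    l.foldl PySem.Set.add (x :: s) = x :: l.foldl PySem.Set.add s := by
  induction l generalizing s with
  | nil => rfl
  | cons a l ih =>
    have hax : a ≠ x := hl a (by simp)
    have hc : (x :: s).contains a = s.contains a := by
      simp [hax]
    simp only [List.foldl_cons]
    unfold PySem.Set.add PySem.Set.contains
    rw [hc]
    split
    · exact ih s (fun y hy => hl y (by simp [hy]))
    · have : (x :: s) ++ [a] = x :: (s ++ [a]) := rfl
      rw [this]
      exact ih (s ++ [a]) (fun y hy => hl y (by simp [hy]))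

-- dedup of a cons: the head, then dedup of the tail with the head filtered out
theorem dedup_cons_filter (x : Int) (t : List Int) :
    PySem.List.dedup (x :: t) = x :: PySem.List.dedup (t.filter (fun y => y ≠ x)) := by
  unfold PySem.List.dedup PySem.Set.ofList
  simp only [List.foldl_cons]
  have h1 : PySem.Set.add PySem.Set.empty x = [x] := rfl
  rw [h1, add_foldl_mem x t [x] (by simp)]
  exact foldl_add_cons x _ [] (fun y hy => by
    have := List.of_mem_filter hy; simpa using this)

-- counting survives filtering by a different value
theorem count_filter_ne (arr : List Int) (x y : Int) (h : y ≠ x) :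
    (arr.filter (fun z => z ≠ x)).count y = arr.count y := by
  rw [List.count_filter]; simp [h]

-- the multiplicity of x is the length drop of filtering it out
theorem count_eq_length_sub (arr : List Int) (x : Int) :
    (arr.count x : Int) = (arr.length : Int) - ((arr.filter (fun z => z ≠ x)).length : Int) := by
  have : arr.length = arr.count x + (arr.filter (fun z => z ≠ x)).length := by
    induction arr with
    | nil => rfl
    | cons a t ih => by_cases h : a = x <;> simp [h, ih] <;> omega
  omega

-- running max with a merged initial value
theorem foldl_max_init (l : List Int) (a b : Int) :
    l.foldl max (max a b) = max a (l.foldl max b) := by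
  induction l generalizing b with
  | nil => rfl
  | cons c l ih => simp only [List.foldl_cons, max_assoc, ih]

-- B's recursion computes exactly A's max over the counts of the distinct values
theorem maxFreq_spec (arr : List Int) (h : arr ≠ []) :
    PySem.List.max? ((PySem.List.dedup arr).map (fun x => (arr.count x : Int))) (fun v => v)
      = some (pvMaxFreqB arr) := by
  induction arr using pvMaxFreqB.induct with
  | case1 => exact absurd rfl h
  | case2 x t rest ih =>
    clear h
    have hrest : rest = t.filter (fun y => decide (y ≠ x)) := by
      simp [rest]
    have hcount : ((x :: t).count x : Int)
        = ((x :: t).length : Int) - (rest.length : Int) := by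
      rw [hrest]; simpa using count_eq_length_sub (x :: t) x
    have hB : pvMaxFreqB (x :: t)
        = max (((x :: t).count x : Int)) (pvMaxFreqB rest) := by
      rw [pvMaxFreqB, hcount]
    set f : Int → Int := fun y => ((x :: t).count y : Int) with hf
    have hdd : PySem.List.dedup (x :: t) = x :: PySem.List.dedup rest := by
      rw [dedup_cons_filter, hrest]
    rw [hdd, List.map_cons, PySem.List.max?_id_cons]
    have hfg : ∀ y ∈ PySem.List.dedup rest, f y = ((rest.count y : Int)) := by
      intro y hy
      have hyr : y ∈ rest := by simpa [pysem] using hy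
      have hyx : y ≠ x := by
        rw [hrest] at hyr
        simpa using (List.of_mem_filter hyr)
      have h1 : rest.count y = t.count y := by
        rw [hrest]; exact count_filter_ne t x y hyx
      have h2 : (x :: t).count y = t.count y := by
        simp [Ne.symm hyx]
      simp [hf, h1, h2]
    rcases hr : rest with _ | ⟨d, ds⟩
    · -- rest = []: x is the only value
      rw [hr] at hB
      have hdnil : PySem.List.dedup ([] : List Int) = [] := rfl
      rw [hdnil, List.map_nil, List.foldl_nil, hB]
      have hnil : pvMaxFreqB ([] : List Int) = 0 := by rw [pvMaxFreqB]
      rw [hnil]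
      simp only [hf]
      have hnn : (0:Int) ≤ ((x :: t).count x : Int) := Int.natCast_nonneg _
      rw [max_eq_left hnn]
    · -- rest nonempty: combine with the recursive maximum
      rw [hr] at ih hfg hB
      have ihh := ih (by simp)
      rcases hd : PySem.List.dedup (d :: ds) with _ | ⟨a, l⟩
      · exfalso
        rw [hd] at ihh
        simp [PySem.List.max?] at ihh
      · rw [hd] at ihh hfg
        set g : Int → Int := fun y => ((d :: ds).count y : Int) with hg
        have hmapeq : (a :: l).map f = (a :: l).map g := List.map_congr_left hfg
        rw [List.map_cons, PySem.List.max?_id_cons] at ihh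
        have hfold : (l.map g).foldl max (g a) = pvMaxFreqB (d :: ds) :=
          Option.some.inj ihh
        rw [hmapeq, List.map_cons, List.foldl_cons, foldl_max_init, hfold, hB]

-- the recursive maximum is nonnegative
theorem pvMaxFreqB_nonneg (arr : List Int) : 0 ≤ pvMaxFreqB arr := by
  induction arr using pvMaxFreqB.induct with
  | case1 => rw [pvMaxFreqB]
  | case2 x t rest ih =>
    have hc : (0:Int) ≤ ((x :: t).length : Int) - (rest.length : Int) := by
      have hr : rest.length ≤ (x :: t).length := by
        simpa [rest] using List.length_filter_le (fun y => decide (y ≠ x)) (x :: t)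
      omega
    rw [pvMaxFreqB]
    exact le_max_of_le_left hc

-- ===== VERDICT (by name: the statement is the Claim_ definition above) =====
theorem maximise_adj_increases_spec : Claim_equal_maximise_adj_increases := by
  intro arr _
  unfold Spec_maximise_adj_increases maximise_adj_increases maximise_adj_increases_alt
  by_cases h : arr = []
  · simp [h]
  · have hv : (PySem.Dict.counter arr).values
        = (PySem.List.dedup arr).map (fun x => (arr.count x : Int)) := by
      simp [PySem.Dict.values, PySem.Dict.items_counter, List.map_map, Function.comp]
    have hloop : pvMaxFreqLoop 0 arr = pvMaxFreqB arr := by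
      rw [loop_eq_maxFreqB 0 arr le_rfl, max_eq_right (pvMaxFreqB_nonneg arr)]
    simp only [if_neg h, PySem.Dict.foldl_insert_getD_add_one_eq_counter, hv,
      maxFreq_spec arr h, hloop]
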